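-- pv_equiv track=rewrite | github.com/dolphin2025/ACSL | 2018-2019/ACSLCon#2Code.py | line5
-- ===== SOURCE A (Python) =====
-- def line5(sent):
--   #*** explained below
--   uwords = sent.split()
--   sent = sent.lower()
--   words = sent.split()
--   bigwords = []
--
--   #finds the length of the biggest word(s)
--   maxlen = len(max(words, key= lambda x: len(x)))
--   for i in words:
--     if len(i)==maxlen:
--       bigwords.append(i)
--
--   #alphabetizes the words if there is a tie
--   bigwords.sort()
--
--   #*** this, combined with above, gets the uppercase version of the word, which was turned into lowercase above
--   ind = words.index(bigwords[0])
--
--   return uwords[ind]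
-- ===== SOURCE B (Python) =====
-- def line5(sent):
--   uwords = sent.split()
--   words = sent.lower().split()
--   best_len = -1
--   best_word = ""
--   best_idx = -1
--   for i, w in enumerate(words):
--     if len(w) > best_len:
--       best_len, best_word, best_idx = len(w), w, i
--     elif len(w) == best_len and w < best_word:
--       best_word, best_idx = w, i
--   return uwords[best_idx]
-- ===== Notes on version B (the rewrite author's own statement) =====
-- stated objective: simpler
-- what changed: one left-to-right pass over the enumerated lowercased words keeping (best_len, best_word, best_idx) replaces A's max-with-key scan, filter pass, sort and list.index; Pre_ excludes sentences with no words, on which both A and B raise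
import Mathlib
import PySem

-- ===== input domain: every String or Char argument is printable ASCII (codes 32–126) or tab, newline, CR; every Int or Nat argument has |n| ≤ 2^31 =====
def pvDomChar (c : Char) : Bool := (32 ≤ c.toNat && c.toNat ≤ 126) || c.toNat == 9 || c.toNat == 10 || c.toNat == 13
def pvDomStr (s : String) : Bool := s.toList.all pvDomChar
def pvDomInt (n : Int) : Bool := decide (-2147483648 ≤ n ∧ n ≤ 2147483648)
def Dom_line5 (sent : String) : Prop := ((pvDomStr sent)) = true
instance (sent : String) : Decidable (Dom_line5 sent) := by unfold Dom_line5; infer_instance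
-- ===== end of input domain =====

-- B replaces A's max-with-key scan + filter pass + sort + list.index by a single pass
-- keeping (best_len, best_word, best_idx); objective: simpler.

-- ===== PORT A =====
def line5 (sent : String) : String :=
  let uwords := PySem.Str.split₀ sent
  let sentL := PySem.Str.lower sent
  let words := PySem.Str.split₀ sentL
  -- maxlen = len(max(words, key=len)); Python raises ValueError when words = [] (excluded by Pre_)
  let maxlen : Int :=
    match PySem.List.max? words (fun x => PySem.Str.len x) with
    | some m => PySem.Str.len m
    | none => 0
  let bigwords := words.foldl
    (fun acc i => if PySem.Str.len i == maxlen then acc ++ [i] else acc) ([] : List String)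
  let bigsorted := PySem.List.sorted bigwords (fun x => x) false
  -- ind = words.index(bigwords[0]); bigwords[0] raises IndexError when words = [] (excluded by Pre_)
  let ind : Int :=
    match PySem.List.pyGet? bigsorted 0 with
    | some w =>
      match PySem.List.index? words w with
      | some k => (k : Int)
      | none => 0
    | none => 0
  (PySem.List.pyGet? uwords ind).getD ""

-- ===== PORT B =====
def line5_alt (sent : String) : String :=
  let uwords := PySem.Str.split₀ sent
  let words := PySem.Str.split₀ (PySem.Str.lower sent)
  let st := (PySem.List.enumerate words 0).foldl
    (fun (acc : Int × String × Int) p =>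
      if PySem.Str.len p.2 > acc.1 then (PySem.Str.len p.2, p.2, p.1)
      else if PySem.Str.len p.2 = acc.1 ∧ p.2 < acc.2.1 then (acc.1, p.2, p.1)
      else acc)
    ((-1 : Int), "", (-1 : Int))
  -- uwords[best_idx]; raises IndexError when words = [] (best_idx = -1, uwords = []; excluded by Pre_)
  (PySem.List.pyGet? uwords st.2.2).getD ""

-- ===== PRECONDITION & SPEC =====
-- Pre_ excludes sentences containing no word (empty / all whitespace): there A raises
-- ValueError in max() and B raises IndexError in uwords[best_idx].
def Pre_line5 (sent : String) : Prop := PySem.Str.split₀ (PySem.Str.lower sent) ≠ []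
instance (sent : String) : Decidable (Pre_line5 sent) := by unfold Pre_line5; infer_instance
def pvWitness_line5 : String := "The Quick brown Fox"
def Spec_line5 (sent : String) (out : String) : Prop := out = line5_alt sent
instance (sent : String) (out : String) : Decidable (Spec_line5 sent out) := by unfold Spec_line5; infer_instance

-- ===== CLAIM (what is proved, stated in full; the proofs are below) =====
def Claim_equal_line5 : Prop := ∀ (sent : String), Dom_line5 sent → Pre_line5 sent → Spec_line5 sent (line5 sent)

-- ===== LEMMAS AND PROOFS =====

-- B's loop step and fold (proof-side names for the lambda inside line5_alt)
def bStep (acc : Int × String × Int) (p : Int × String) : Int × String × Int :=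
  if PySem.Str.len p.2 > acc.1 then (PySem.Str.len p.2, p.2, p.1)
  else if PySem.Str.len p.2 = acc.1 ∧ p.2 < acc.2.1 then (acc.1, p.2, p.1)
  else acc

def bFold (ws : List String) : Int × String × Int :=
  (PySem.List.enumerate ws 0).foldl bStep ((-1 : Int), "", (-1 : Int))

-- A's intermediate values as functions of the lowercased word list
def aMaxlen (ws : List String) : Int :=
  match PySem.List.max? ws (fun x => PySem.Str.len x) with
  | some m => PySem.Str.len m
  | none => 0

def aBig (ws : List String) : List String :=
  PySem.List.sorted
    (ws.foldl (fun acc i => if PySem.Str.len i == aMaxlen ws then acc ++ [i] else acc) [])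
    (fun x => x) false

def aInd (ws : List String) : Int :=
  match PySem.List.pyGet? (aBig ws) 0 with
  | some w =>
    match PySem.List.index? ws w with
    | some k => (k : Int)
    | none => 0
  | none => 0

theorem bFold_append (l : List String) (w : String) :
    bFold (l ++ [w]) = bStep (bFold l) ((l.length : Int), w) := by
  simp [bFold, PySem.List.enumerate_append]

theorem strLen_nonneg (w : String) : (0 : Int) ≤ PySem.Str.len w := by
  simp [PySem.Str.len_eq]

-- invariant of B's loop: after the whole pass the state is the length of the longest word,
-- the lexicographically least longest word, and the index of its first occurrence
theorem bFold_char (ws : List String) (h : ws ≠ []) :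
    ∃ (k : Nat) (hk : k < ws.length),
      (bFold ws).2.2 = (k : Int) ∧ ws[k] = (bFold ws).2.1 ∧
      (bFold ws).1 = PySem.Str.len (bFold ws).2.1 ∧
      (∀ w ∈ ws, PySem.Str.len w ≤ (bFold ws).1) ∧
      (∀ w ∈ ws, PySem.Str.len w = (bFold ws).1 → ¬ w < (bFold ws).2.1) ∧
      (∀ j (hj : j < k), ws[j] ≠ (bFold ws).2.1) := by
  induction ws using List.reverseRecOn with
  | nil => exact absurd rfl h
  | append_singleton l w ih =>
    rw [bFold_append]
    by_cases hl : l = []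
    · subst hl
      have hlen : PySem.Str.len w > (-1 : Int) := lt_of_lt_of_le (by norm_num) (strLen_nonneg w)
      simp only [bFold, PySem.List.enumerate_nil, List.foldl_nil]
      rw [bStep, if_pos hlen]
      refine ⟨0, by simp, by simp, by simp, by simp, ?_, ?_, by omega⟩
      · intro w' hw'; simp at hw'; subst hw'; simp
      · intro w' hw' _; simp at hw'; subst hw'; exact lt_irrefl _
    · obtain ⟨k, hk, hidx, hget, hlen, hmax, hmin, hfirst⟩ := ih hl
      set st := bFold l with hst
      by_cases h1 : PySem.Str.len w > st.1
      · rw [bStep, if_pos h1]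
        refine ⟨l.length, by simp, by simp, by simp, by simp, ?_, ?_, ?_⟩
        · intro w' hw'
          rcases List.mem_append.mp hw' with h' | h'
          · exact le_of_lt (lt_of_le_of_lt (hmax w' h') h1)
          · simp at h'; subst h'; simp
        · intro w' hw' hlw'
          rcases List.mem_append.mp hw' with h' | h'
          · exfalso; have := hmax w' h'; simp only [] at hlw'; omega
          · simp at h'; subst h'; exact lt_irrefl _
        · intro j hj hEq
          have hjl : j < l.length := hj
          rw [List.getElem_append_left hjl] at hEq
          have := hmax l[j] (List.getElem_mem hjl)
          rw [hEq] at this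
          simp only [] at this
          omega
      · by_cases h2 : PySem.Str.len w = st.1 ∧ w < st.2.1
        · rw [bStep, if_neg h1, if_pos h2]
          refine ⟨l.length, by simp, by simp, by simp, ?_, ?_, ?_, ?_⟩
          · simp only []; omega
          · intro w' hw'
            rcases List.mem_append.mp hw' with h' | h'
            · exact hmax w' h'
            · simp at h'; subst h'; simp only []; omega
          · intro w' hw' hlw'
            simp only [] at hlw' ⊢
            rcases List.mem_append.mp hw' with h' | h'
            · have hle : st.2.1 ≤ w' := not_lt.mp (hmin w' h' hlw')
              exact not_lt.mpr (le_of_lt (lt_of_lt_of_le h2.2 hle))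
            · simp at h'; subst h'; exact lt_irrefl _
          · intro j hj hEq
            have hjl : j < l.length := hj
            rw [List.getElem_append_left hjl] at hEq
            simp only [] at hEq
            have hmem := List.getElem_mem hjl
            have hl2 : PySem.Str.len l[j] = st.1 := by rw [hEq]; exact h2.1
            have hnot := hmin l[j] hmem hl2
            rw [hEq] at hnot
            exact hnot h2.2
        · rw [bStep, if_neg h1, if_neg h2]
          refine ⟨k, by simp; omega, hidx, ?_, hlen, ?_, ?_, ?_⟩
          · rw [List.getElem_append_left hk]; exact hget
          · intro w' hw'
            rcases List.mem_append.mp hw' with h' | h'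
            · exact hmax w' h'
            · simp at h'; subst h'; omega
          · intro w' hw' hlw'
            rcases List.mem_append.mp hw' with h' | h'
            · exact hmin w' h' hlw'
            · simp at h'; subst h'
              intro hcon
              exact h2 ⟨hlw', hcon⟩
          · intro j hj
            have hjl : j < l.length := by omega
            rw [List.getElem_append_left hjl]
            exact hfirst j hj

-- list.index(v) = k when v sits at k and nowhere earlier
theorem index?_of_first (ws : List String) (v : String) (k : Nat) (hk : k < ws.length)
    (hv : ws[k] = v) (hfirst : ∀ j (hj : j < k), ws[j] ≠ v) :
    PySem.List.index? ws v = some k := by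
  rw [PySem.List.index?_eq_some_iff]
  refine ⟨ws.take k, ws.drop (k+1), ?_, by simp [hk.le], ?_⟩
  · conv_lhs => rw [← List.take_append_drop k ws]
    rw [List.drop_eq_getElem_cons hk, hv]
  · intro hm
    obtain ⟨j, hj, hje⟩ := List.mem_iff_getElem.mp hm
    have hjk : j < k := by simpa [hk.le] using hj
    rw [List.getElem_take] at hje
    exact hfirst j hjk hje

-- A's index (sort + first element + list.index) equals B's running best index
theorem main_ind (ws : List String) (h : ws ≠ []) : aInd ws = (bFold ws).2.2 := by
  obtain ⟨k, hk, hidx, hget, hlen, hmax, hmin, hfirst⟩ := bFold_char ws h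
  set st := bFold ws with hst
  cases hmm : PySem.List.max? ws (fun x => PySem.Str.len x) with
  | none => exact absurd ((PySem.List.max?_eq_none_iff ws _).mp hmm) h
  | some m =>
    have hmlen : aMaxlen ws = PySem.Str.len m := by unfold aMaxlen; rw [hmm]
    have hmmem : m ∈ ws := PySem.List.max?_mem hmm
    have hmax' : ∀ y ∈ ws, PySem.Str.len y ≤ PySem.Str.len m := PySem.List.max?_isMax hmm
    have hbmem : st.2.1 ∈ ws := hget ▸ List.getElem_mem hk
    have hblen : PySem.Str.len st.2.1 = PySem.Str.len m :=
      le_antisymm (hmax' _ hbmem) (hlen ▸ hmax m hmmem)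
    have hFeq : ws.foldl (fun acc i => if PySem.Str.len i == aMaxlen ws then acc ++ [i] else acc) [] =
        ws.filter (fun i => PySem.Str.len i == aMaxlen ws) := by
      simpa using PySem.List.foldl_append_if_eq_filter (fun i => PySem.Str.len i == aMaxlen ws) ws []
    have hbig : aBig ws = PySem.List.sorted (ws.filter (fun i => PySem.Str.len i == aMaxlen ws)) (fun x => x) false := by
      rw [aBig, hFeq]
    have hbF : st.2.1 ∈ ws.filter (fun i => PySem.Str.len i == aMaxlen ws) :=
      List.mem_filter.mpr ⟨hbmem, by rw [hmlen, hblen]; simp⟩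
    have hbBig : st.2.1 ∈ aBig ws := by rw [hbig, PySem.List.mem_sorted]; exact hbF
    have h0 : 0 < (aBig ws).length := List.length_pos_of_mem hbBig
    have hw0 : PySem.List.pyGet? (aBig ws) 0 = some (aBig ws)[0] := by
      rw [PySem.List.pyGet?_zero, List.getElem?_eq_getElem h0]
    set w0 := (aBig ws)[0] with hw0def
    have hw0Big : w0 ∈ aBig ws := List.getElem_mem h0
    have hw0F : w0 ∈ ws.filter (fun i => PySem.Str.len i == aMaxlen ws) := by
      have hx := hw0Big
      rw [hbig] at hx
      exact (PySem.List.mem_sorted _ _ _ _).mp hx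
    have hw0mem : w0 ∈ ws := (List.mem_filter.mp hw0F).1
    have hw0len : PySem.Str.len w0 = aMaxlen ws := by
      have := (List.mem_filter.mp hw0F).2
      simpa using this
    have hw0le : w0 ≤ st.2.1 := by
      obtain ⟨q, hq, hqe⟩ := List.mem_iff_getElem.mp hbBig
      have hq' : q < (PySem.List.sorted (ws.filter (fun i => PySem.Str.len i == aMaxlen ws)) (fun x => x) false).length := by
        rw [← hbig]; exact hq
      have mono := PySem.List.sorted_id_getElem_mono
        (ws.filter (fun i => PySem.Str.len i == aMaxlen ws)) (Nat.zero_le q) hq'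
      have e0 := List.getElem_of_eq hbig h0
      have eq' := List.getElem_of_eq hbig hq
      rw [← hqe, hw0def, e0, eq']
      exact mono
    have hble : st.2.1 ≤ w0 := by
      have hl : PySem.Str.len w0 = st.1 := by rw [hw0len, hmlen, ← hblen, ← hlen]
      exact not_lt.mp (hmin w0 hw0mem hl)
    have hbw0 : w0 = st.2.1 := le_antisymm hw0le hble
    have hindex : PySem.List.index? ws w0 = some k := by
      refine index?_of_first ws w0 k hk ?_ ?_
      · rw [hget, hbw0]
      · intro j hj; rw [hbw0]; exact hfirst j hj
    rw [aInd, hw0]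
    simp only [hindex, hidx]

set_option maxHeartbeats 2000000 in
theorem line5_eq (sent : String) :
    line5 sent = (PySem.List.pyGet? (PySem.Str.split₀ sent)
      (aInd (PySem.Str.split₀ (PySem.Str.lower sent)))).getD "" := by
  simp only [line5, aInd, aBig, aMaxlen]
  rfl

theorem line5_alt_eq (sent : String) :
    line5_alt sent = (PySem.List.pyGet? (PySem.Str.split₀ sent)
      ((bFold (PySem.Str.split₀ (PySem.Str.lower sent))).2.2)).getD "" := by
  simp only [line5_alt, bFold]
  rfl

-- ===== VERDICT (by name: the statement is the Claim_ definition above) =====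
theorem line5_spec : Claim_equal_line5 := by
  intro sent _hd hpre
  unfold Spec_line5
  rw [line5_eq, line5_alt_eq, main_ind _ hpre]
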